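-- pv_equiv track=rewrite | github.com/fourth-idiot/leetcode | 311-sparse-matrix-multiplication/311-sparse-matrix-multiplication.py | compressColumnWise
-- ===== SOURCE A (Python) =====
-- def compressColumnWise(mat):
--     numRows, numCols = len(mat), len(mat[0])
--     v = []
--     rowIndex = []
--     colIndex = [0]
--     for j in range(numCols):
--         for i in range(numRows):
--             if(mat[i][j]):
--                 v.append(mat[i][j])
--                 rowIndex.append(i)
--         colIndex.append(len(v))
--     return v, rowIndex, colIndex
-- ===== SOURCE B (Python) =====
-- def compressColumnWise(mat):
--     numCols = len(mat[0])
--     vals = [[] for _ in range(numCols)]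
--     rows = [[] for _ in range(numCols)]
--     for i, row in enumerate(mat):
--         for j in range(numCols):
--             if row[j]:
--                 vals[j].append(row[j])
--                 rows[j].append(i)
--     v = [x for b in vals for x in b]
--     rowIndex = [r for b in rows for r in b]
--     colIndex = [0]
--     for b in vals:
--         colIndex.append(colIndex[-1] + len(b))
--     return v, rowIndex, colIndex
-- ===== Notes on version B (the rewrite author's own statement) =====
-- stated objective: alternative
-- what changed: Replaces A's column-major double scan (one pass over all rows per column) by a single row-major pass that collects values/row-indices into per-column buckets, then flattens the buckets in column order and emits colIndex as running prefix sums of bucket lengths.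
import Mathlib
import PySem

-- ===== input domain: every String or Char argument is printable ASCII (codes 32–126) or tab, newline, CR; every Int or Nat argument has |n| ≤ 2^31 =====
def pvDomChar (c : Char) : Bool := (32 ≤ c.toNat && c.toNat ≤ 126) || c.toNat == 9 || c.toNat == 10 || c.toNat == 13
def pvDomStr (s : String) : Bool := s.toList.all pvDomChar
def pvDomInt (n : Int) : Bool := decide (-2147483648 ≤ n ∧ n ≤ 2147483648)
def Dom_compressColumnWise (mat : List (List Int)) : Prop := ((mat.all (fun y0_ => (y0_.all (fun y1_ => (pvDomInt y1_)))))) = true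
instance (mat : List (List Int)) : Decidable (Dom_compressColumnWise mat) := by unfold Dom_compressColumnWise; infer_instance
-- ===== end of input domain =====

-- B replaces A's column-major double scan by a single row-major pass into per-column
-- buckets flattened at the end (alternative decomposition, same asymptotic cost).


-- ===== PORT A =====
-- inner loop 'for i in range(numRows): if mat[i][j]: v.append(...); rowIndex.append(i)'
-- (indexing via getD is exact under Pre_, which rules out the IndexError inputs)
def aInner (mat : List (List Int)) (j : Nat) (st : List Int × List Int) : List Int × List Int :=
  (List.range mat.length).foldl (fun st i =>
    if (mat.getD i []).getD j 0 ≠ 0 then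
      (st.1 ++ [(mat.getD i []).getD j 0], st.2 ++ [(i : Int)])
    else st) st

-- body of 'for j in range(numCols)'
def aStep (mat : List (List Int)) (st : List Int × List Int × List Int) (j : Nat) :
    List Int × List Int × List Int :=
  let p := aInner mat j (st.1, st.2.1)
  (p.1, p.2, st.2.2 ++ [(p.1.length : Int)])

def compressColumnWise (mat : List (List Int)) : List Int × List Int × List Int :=
  (List.range (mat.headD []).length).foldl (aStep mat) ([], [], [(0 : Int)])

-- ===== PORT B =====
-- one row of B's row-major pass: append row[j] / i to buckets vals[j] / rows[j]
def bRow (n : Nat) (i : Int) (row : List Int) (st : List (List Int) × List (List Int)) :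
    List (List Int) × List (List Int) :=
  (List.range n).foldl (fun st j =>
    if row.getD j 0 ≠ 0 then
      (st.1.set j (st.1.getD j [] ++ [row.getD j 0]), st.2.set j (st.2.getD j [] ++ [i]))
    else st) st

def compressColumnWise_alt (mat : List (List Int)) : List Int × List Int × List Int :=
  let n := (mat.headD []).length
  let init : List (List Int) × List (List Int) :=
    ((List.range n).map (fun _ => []), (List.range n).map (fun _ => []))
  let bs := (PySem.List.enumerate mat 0).foldl (fun st p => bRow n p.1 p.2 st) init
  let v := bs.1.flatten
  let rowIndex := bs.2.flatten
  let colIndex := bs.1.foldl (fun ci b => ci ++ [PySem.List.pyGetD ci (-1) 0 + (b.length : Int)]) [(0 : Int)]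
  (v, rowIndex, colIndex)

-- ===== PRECONDITION & SPEC =====
-- Pre_ excludes exactly the inputs where the Python A raises IndexError:
-- mat == [] (mat[0]) or some row shorter than len(mat[0]) (mat[i][j]).
def Pre_compressColumnWise (mat : List (List Int)) : Prop :=
  mat ≠ [] ∧ ∀ row ∈ mat, (mat.headD []).length ≤ row.length
instance (mat : List (List Int)) : Decidable (Pre_compressColumnWise mat) := by
  unfold Pre_compressColumnWise; infer_instance

def pvWitness_compressColumnWise : List (List Int) := [[1, 0], [0, 2]]

def Spec_compressColumnWise (mat : List (List Int)) (out : List Int × List Int × List Int) : Prop := out = compressColumnWise_alt mat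
instance (mat : List (List Int)) (out : List Int × List Int × List Int) : Decidable (Spec_compressColumnWise mat out) := by unfold Spec_compressColumnWise; infer_instance

-- ===== CLAIM (what is proved, stated in full; the proofs are below) =====
def Claim_equal_compressColumnWise : Prop := ∀ (mat : List (List Int)), Dom_compressColumnWise mat → Pre_compressColumnWise mat → Spec_compressColumnWise mat (compressColumnWise mat)

-- ===== LEMMAS AND PROOFS =====

-- the (value, row-index) entries of column j, scanning rows from row-index k
def colE (rows : List (List Int)) (k : Int) (j : Nat) : List (Int × Int) :=
  match rows with
  | [] => []
  | r :: rs =>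
    if r.getD j 0 = 0 then colE rs (k + 1) j
    else (r.getD j 0, k) :: colE rs (k + 1) j

-- running prefix sums (colIndex tail)
def offs (n : Int) : List Nat → List Int
  | [] => []
  | l :: ls => (n + l) :: offs (n + l) ls

lemma foldA (f : Nat → Int) : ∀ (is : List Nat) (v r : List Int),
    is.foldl (fun st i => if f i ≠ 0 then (st.1 ++ [f i], st.2 ++ [(i : Int)]) else st) (v, r)
    = (v ++ (is.filterMap (fun i => if f i = 0 then none else some (f i, (i : Int)))).map Prod.fst,
       r ++ (is.filterMap (fun i => if f i = 0 then none else some (f i, (i : Int)))).map Prod.snd) := by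
  intro is
  induction is with
  | nil => intro v r; simp
  | cons a l ih =>
    intro v r
    rw [List.foldl_cons, List.filterMap_cons]
    by_cases h : f a = 0
    · rw [if_neg (by simpa using h), if_pos h, ih]
    · rw [if_pos h, if_neg h, ih]
      simp [List.append_assoc]

lemma fm_colE : ∀ (rows : List (List Int)) (k : Int) (j : Nat),
    (List.range rows.length).filterMap
      (fun i => if (rows.getD i []).getD j 0 = 0 then none
                else some ((rows.getD i []).getD j 0, k + (i : Int)))
    = colE rows k j := by
  intro rows
  induction rows with
  | nil => intro k j; simp [colE]
  | cons r rs ih =>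
    intro k j
    have hr : List.range (r :: rs).length = 0 :: (List.range rs.length).map Nat.succ := by
      simp [List.range_succ_eq_map]
    rw [hr, List.filterMap_cons, List.filterMap_map]
    have hcong : (List.range rs.length).filterMap
        ((fun i => if ((r :: rs).getD i []).getD j 0 = 0 then none
                   else some (((r :: rs).getD i []).getD j 0, k + (i : Int))) ∘ Nat.succ)
        = (List.range rs.length).filterMap
          (fun i => if (rs.getD i []).getD j 0 = 0 then none
                    else some ((rs.getD i []).getD j 0, (k + 1) + (i : Int))) := by
      apply List.filterMap_congr
      intro i _
      simp only [Function.comp]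
      have h2 : k + (((i : Int)) + 1) = k + 1 + (i : Int) := by ring
      simp only [List.getD_cons_succ, Nat.cast_succ]
      rw [h2]
    rw [hcong, ih (k + 1) j]
    by_cases hz : r.getD j 0 = 0 <;>
      · simp [List.getD] at hz
        simp [colE, List.getD, hz]

lemma aInner_colE (mat : List (List Int)) (j : Nat) (v r : List Int) :
    aInner mat j (v, r) = (v ++ (colE mat 0 j).map Prod.fst, r ++ (colE mat 0 j).map Prod.snd) := by
  have h := foldA (fun i => (mat.getD i []).getD j 0) (List.range mat.length) v r
  have h2 : (List.range mat.length).filterMap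
      (fun i => if (mat.getD i []).getD j 0 = 0 then none
                else some ((mat.getD i []).getD j 0, (i : Int))) = colE mat 0 j := by
    rw [← fm_colE mat 0 j]
    apply List.filterMap_congr
    intro i _
    simp
  rw [aInner, h, h2]

lemma A_outer (mat : List (List Int)) : ∀ (js : List Nat) (v r c : List Int),
    js.foldl (aStep mat) (v, r, c)
    = (v ++ (js.map (fun j => (colE mat 0 j).map Prod.fst)).flatten,
       r ++ (js.map (fun j => (colE mat 0 j).map Prod.snd)).flatten,
       c ++ offs (v.length : Int) (js.map (fun j => (colE mat 0 j).length))) := by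
  intro js
  induction js with
  | nil => intro v r c; simp [offs]
  | cons a l ih =>
    intro v r c
    rw [List.foldl_cons]
    have hstep : aStep mat (v, r, c) a
        = (v ++ (colE mat 0 a).map Prod.fst, r ++ (colE mat 0 a).map Prod.snd,
           c ++ [((v ++ (colE mat 0 a).map Prod.fst).length : Int)]) := by
      simp [aStep, aInner_colE]
    rw [hstep, ih]
    simp [offs, List.append_assoc]

lemma bRow_succ (n : Nat) (i : Int) (row : List Int) (st : List (List Int) × List (List Int)) :
    bRow (n + 1) i row st
    = (if row.getD n 0 ≠ 0 then
        ((bRow n i row st).1.set n ((bRow n i row st).1.getD n [] ++ [row.getD n 0]),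
         (bRow n i row st).2.set n ((bRow n i row st).2.getD n [] ++ [i]))
       else bRow n i row st) := by
  rw [bRow, bRow, List.range_succ, List.foldl_append, List.foldl_cons, List.foldl_nil]

lemma bRow_len (i : Int) (row : List Int) : ∀ (n : Nat) (st : List (List Int) × List (List Int)),
    (bRow n i row st).1.length = st.1.length ∧ (bRow n i row st).2.length = st.2.length := by
  intro n
  induction n with
  | zero => intro st; simp [bRow]
  | succ n ih =>
    intro st
    rw [bRow_succ]
    split
    · simp [ih st]
    · exact ih st

lemma bRow_getD (i : Int) (row : List Int) : ∀ (n : Nat) (st : List (List Int) × List (List Int)) (j : Nat),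
    j < st.1.length → j < st.2.length →
    ((bRow n i row st).1.getD j [] =
        (if j < n ∧ row.getD j 0 ≠ 0 then st.1.getD j [] ++ [row.getD j 0] else st.1.getD j [])
     ∧ (bRow n i row st).2.getD j [] =
        (if j < n ∧ row.getD j 0 ≠ 0 then st.2.getD j [] ++ [i] else st.2.getD j [])) := by
  intro n
  induction n with
  | zero => intro st j h1 h2; simp [bRow]
  | succ n ih =>
    intro st j h1 h2
    obtain ⟨ihl, ihr⟩ := ih st j h1 h2
    have hlen := bRow_len i row n st
    have hcond : (j < n + 1 ∧ row.getD j 0 ≠ 0) ↔ (j < n ∧ row.getD j 0 ≠ 0) ∨ (j = n ∧ row.getD j 0 ≠ 0) := by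
      constructor
      · rintro ⟨h, h'⟩
        rcases Nat.lt_succ_iff_lt_or_eq.mp h with h | h
        · exact Or.inl ⟨h, h'⟩
        · exact Or.inr ⟨h, h'⟩
      · rintro (⟨h, h'⟩ | ⟨h, h'⟩) <;> exact ⟨by omega, h'⟩
    rw [bRow_succ]
    by_cases hz : row.getD n 0 ≠ 0
    · rw [if_pos hz]
      by_cases hj : j = n
      · subst hj
        have hf : ¬ (j < j ∧ row.getD j 0 ≠ 0) := fun h => absurd h.1 (lt_irrefl j)
        rw [if_neg hf] at ihl ihr
        have hl1 : j < (bRow j i row st).1.length := by rw [hlen.1]; exact h1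
        have hl2 : j < (bRow j i row st).2.length := by rw [hlen.2]; exact h2
        constructor
        · rw [if_pos ⟨Nat.lt_succ_self j, hz⟩]
          calc ((bRow j i row st).1.set j ((bRow j i row st).1.getD j [] ++ [row.getD j 0])).getD j []
              = (bRow j i row st).1.getD j [] ++ [row.getD j 0] := by
                simp [List.getD, hl1]
            _ = st.1.getD j [] ++ [row.getD j 0] := by rw [ihl]
        · rw [if_pos ⟨Nat.lt_succ_self j, hz⟩]
          calc ((bRow j i row st).2.set j ((bRow j i row st).2.getD j [] ++ [i])).getD j []
              = (bRow j i row st).2.getD j [] ++ [i] := by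
                simp [List.getD, hl2]
            _ = st.2.getD j [] ++ [i] := by rw [ihr]
      · have hcond' : (j < n + 1 ∧ row.getD j 0 ≠ 0) ↔ (j < n ∧ row.getD j 0 ≠ 0) := by
          rw [hcond]
          constructor
          · rintro (h | ⟨h, _⟩)
            · exact h
            · exact absurd h hj
          · exact Or.inl
        constructor
        · calc ((bRow n i row st).1.set n ((bRow n i row st).1.getD n [] ++ [row.getD n 0])).getD j []
              = (bRow n i row st).1.getD j [] := by
                simp [List.getD, Ne.symm hj]
            _ = _ := by
                rw [ihl]
                by_cases hc : j < n ∧ row.getD j 0 ≠ 0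
                · rw [if_pos hc, if_pos (hcond'.mpr hc)]
                · rw [if_neg hc, if_neg (fun h => hc (hcond'.mp h))]
        · calc ((bRow n i row st).2.set n ((bRow n i row st).2.getD n [] ++ [i])).getD j []
              = (bRow n i row st).2.getD j [] := by
                simp [List.getD, Ne.symm hj]
            _ = _ := by
                rw [ihr]
                by_cases hc : j < n ∧ row.getD j 0 ≠ 0
                · rw [if_pos hc, if_pos (hcond'.mpr hc)]
                · rw [if_neg hc, if_neg (fun h => hc (hcond'.mp h))]
    · rw [if_neg hz]
      have hcond' : (j < n + 1 ∧ row.getD j 0 ≠ 0) ↔ (j < n ∧ row.getD j 0 ≠ 0) := by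
        rw [hcond]
        constructor
        · rintro (h | ⟨h, h'⟩)
          · exact h
          · exact absurd (h ▸ h') hz
        · exact Or.inl
      rw [ihl, ihr]
      constructor
      · by_cases hc : j < n ∧ row.getD j 0 ≠ 0
        · rw [if_pos hc, if_pos (hcond'.mpr hc)]
        · rw [if_neg hc, if_neg (fun h => hc (hcond'.mp h))]
      · by_cases hc : j < n ∧ row.getD j 0 ≠ 0
        · rw [if_pos hc, if_pos (hcond'.mpr hc)]
        · rw [if_neg hc, if_neg (fun h => hc (hcond'.mp h))]

lemma B_rows (n : Nat) : ∀ (rows : List (List Int)) (k : Int) (st : List (List Int) × List (List Int)),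
    st.1.length = n → st.2.length = n →
    (((PySem.List.enumerate rows k).foldl (fun st p => bRow n p.1 p.2 st) st).1.length = n
     ∧ ((PySem.List.enumerate rows k).foldl (fun st p => bRow n p.1 p.2 st) st).2.length = n
     ∧ ∀ j < n,
        ((PySem.List.enumerate rows k).foldl (fun st p => bRow n p.1 p.2 st) st).1.getD j []
          = st.1.getD j [] ++ (colE rows k j).map Prod.fst
        ∧ ((PySem.List.enumerate rows k).foldl (fun st p => bRow n p.1 p.2 st) st).2.getD j []
          = st.2.getD j [] ++ (colE rows k j).map Prod.snd) := by
  intro rows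
  induction rows with
  | nil => intro k st h1 h2; simp [PySem.List.enumerate, colE, h1, h2]
  | cons r rs ih =>
    intro k st h1 h2
    rw [PySem.List.enumerate_cons, List.foldl_cons]
    have hlen := bRow_len k r n st
    have h1' : (bRow n k r st).1.length = n := by rw [hlen.1, h1]
    have h2' : (bRow n k r st).2.length = n := by rw [hlen.2, h2]
    obtain ⟨L1, L2, IH⟩ := ih (k + 1) (bRow n k r st) h1' h2'
    refine ⟨L1, L2, ?_⟩
    intro j hj
    obtain ⟨e1, e2⟩ := IH j hj
    have hg := bRow_getD k r n st j (by omega) (by omega)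
    constructor
    · rw [e1, hg.1]
      by_cases hz : r.getD j 0 = 0 <;>
        · simp only [List.getD] at hz
          simp [colE, List.getD, hz, hj, List.append_assoc]
    · rw [e2, hg.2]
      by_cases hz : r.getD j 0 = 0 <;>
        · simp only [List.getD] at hz
          simp [colE, List.getD, hz, hj, List.append_assoc]

lemma colIdx_fold : ∀ (bs : List (List Int)) (c : List Int) (last : Int),
    PySem.List.pyGetD c (-1) 0 = last →
    bs.foldl (fun ci b => ci ++ [PySem.List.pyGetD ci (-1) 0 + (b.length : Int)]) c
    = c ++ offs last (bs.map List.length) := by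
  intro bs
  induction bs with
  | nil => intro c last h; simp [offs]
  | cons b l ih =>
    intro c last h
    rw [List.foldl_cons, List.map_cons, h]
    rw [ih (c ++ [last + (b.length : Int)]) (last + b.length)
        (PySem.List.pyGetD_neg_one_append_singleton c (last + (b.length : Int)) 0)]
    simp [offs, List.append_assoc]

-- ===== VERDICT (by name: the statement is the Claim_ definition above) =====
theorem compressColumnWise_spec : Claim_equal_compressColumnWise := by
  intro mat _ _
  show compressColumnWise mat = compressColumnWise_alt mat
  obtain ⟨hL1, hL2, hg⟩ := B_rows (mat.headD []).length mat 0
      (((List.range (mat.headD []).length).map fun _ => []),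
       ((List.range (mat.headD []).length).map fun _ => [])) (by simp) (by simp)
  set n := (mat.headD []).length with hn
  set bsf := (PySem.List.enumerate mat 0).foldl (fun st p => bRow n p.1 p.2 st)
      (((List.range n).map fun _ => []), ((List.range n).map fun _ => [])) with hbsf
  have hinit : ∀ j, j < n → (((List.range n).map fun (_ : Nat) => ([] : List Int))).getD j [] = [] := by
    intro j hj
    simp [List.getD, hj]
  have e1 : bsf.1 = (List.range n).map (fun j => (colE mat 0 j).map Prod.fst) := by
    apply List.ext_getElem
    · simp [hL1]
    · intro j hj hj2
      have hjn : j < n := by simpa [hL1] using hj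
      have h := (hg j hjn).1
      rw [hinit j hjn, List.nil_append, List.getD_eq_getElem _ _ hj] at h
      simp [h]
  have e2 : bsf.2 = (List.range n).map (fun j => (colE mat 0 j).map Prod.snd) := by
    apply List.ext_getElem
    · simp [hL2]
    · intro j hj hj2
      have hjn : j < n := by simpa [hL2] using hj
      have h := (hg j hjn).2
      rw [hinit j hjn, List.nil_append, List.getD_eq_getElem _ _ hj] at h
      simp [h]
  have hcol := colIdx_fold bsf.1 [0] 0 (by decide)
  rw [compressColumnWise, compressColumnWise_alt]
  simp only [← hn, ← hbsf]
  rw [A_outer, ← e1, ← e2, hcol]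
  simp only [e1, List.map_map, List.nil_append, List.length_nil, Nat.cast_zero]
  have hml : List.map (fun j => (colE mat 0 j).length) (List.range n)
      = List.map (List.length ∘ fun j => List.map Prod.fst (colE mat 0 j)) (List.range n) := by
    apply List.map_congr_left
    intro j _
    simp
  rw [hml]
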